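-- pv_equiv track=rewrite | github.com/iamsavva/gcs-pw-poly | corner_test.py | check_edge
-- ===== SOURCE A (Python) =====
-- def check_edge(left, right):
--     edges = []
--     for i in range(1,13):
--         edges.append( (i,i) )
--     edges.append( (2,1) )
--     edges.append( (3,2) )
--     edges.append( (4,3) )
--     edges.append( (5,4) )
--     edges.append( (6,5) )
--     edges.append( (6,7) )
--     edges.append( (7,8) )
--     edges.append( (8,9) )
--     edges.append( (9,10) )
--     edges.append( (10,11) )
--     edges.append( (11,12) )
--     edges.append( (12,1) )
--     edges.append( (1,12) )
--     return (left,right) in edges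
-- ===== SOURCE B (Python) =====
-- def check_edge(left, right):
--     return (
--         (left == right and 1 <= left <= 12)
--         or (right == left - 1 and 2 <= left <= 6)
--         or (right == left + 1 and 6 <= left <= 11)
--         or (left, right) in ((12, 1), (1, 12))
--     )
-- ===== Notes on version B (the rewrite author's own statement) =====
-- stated objective: simpler
-- what changed: Replaced building a 26-element edge list and scanning it for membership with a direct arithmetic predicate on (left, right): diagonal 1..12, descending neighbours 2..6, ascending neighbours 6..11, plus the two wrap pairs.
import Mathlib
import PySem

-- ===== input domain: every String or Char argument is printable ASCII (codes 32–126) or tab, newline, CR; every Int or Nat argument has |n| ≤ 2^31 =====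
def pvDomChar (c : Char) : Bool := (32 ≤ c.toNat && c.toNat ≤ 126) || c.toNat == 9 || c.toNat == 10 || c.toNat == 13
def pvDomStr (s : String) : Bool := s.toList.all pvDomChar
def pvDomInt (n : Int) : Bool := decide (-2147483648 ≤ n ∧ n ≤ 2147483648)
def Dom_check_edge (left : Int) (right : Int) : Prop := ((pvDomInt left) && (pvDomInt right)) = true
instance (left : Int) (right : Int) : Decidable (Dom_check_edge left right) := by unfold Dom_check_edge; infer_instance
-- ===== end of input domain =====

-- B replaces A's build-a-list-then-scan membership test with a direct O(1) arithmetic predicate (objective: simpler).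

-- ===== PORT A =====
-- literal transliteration: build the edges list (range loop appending (i,i), then the fixed appends), then test membership
def check_edge (left : Int) (right : Int) : Bool :=
  let edges : List (Int × Int) :=
    (PySem.List.pyRange 1 13 1).foldl (fun acc i => acc ++ [(i, i)]) []
  let edges := edges ++ [(2,1)] ++ [(3,2)] ++ [(4,3)] ++ [(5,4)] ++ [(6,5)]
    ++ [(6,7)] ++ [(7,8)] ++ [(8,9)] ++ [(9,10)] ++ [(10,11)] ++ [(11,12)]
    ++ [(12,1)] ++ [(1,12)]
  decide ((left, right) ∈ edges)

-- ===== PORT B =====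
def check_edge_alt (left : Int) (right : Int) : Bool :=
  (left == right && decide (1 ≤ left) && decide (left ≤ 12))
  || (right == left - 1 && decide (2 ≤ left) && decide (left ≤ 6))
  || (right == left + 1 && decide (6 ≤ left) && decide (left ≤ 11))
  || ((left, right) == (12, 1) || (left, right) == (1, 12))

-- ===== PRECONDITION & SPEC =====
def Spec_check_edge (left : Int) (right : Int) (out : Bool) : Prop := out = check_edge_alt left right
instance (left : Int) (right : Int) (out : Bool) : Decidable (Spec_check_edge left right out) := by unfold Spec_check_edge; infer_instance

-- ===== CLAIM (what is proved, stated in full; the proofs are below) =====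
def Claim_equal_check_edge : Prop := ∀ (left : Int) (right : Int), Dom_check_edge left right → Spec_check_edge left right (check_edge left right)

-- ===== LEMMAS AND PROOFS =====

-- ===== VERDICT (by name: the statement is the Claim_ definition above) =====
theorem check_edge_spec : Claim_equal_check_edge := by
  intro left right _
  unfold Spec_check_edge
  have hE : (PySem.List.pyRange 1 13 1).foldl (fun acc i => acc ++ [(i, i)]) ([] : List (Int × Int))
      = [(1,1),(2,2),(3,3),(4,4),(5,5),(6,6),(7,7),(8,8),(9,9),(10,10),(11,11),(12,12)] := by
    rw [PySem.List.pyRange_one 1 13]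
    norm_num [List.range_succ]
    decide
  simp only [check_edge, check_edge_alt]
  rw [hE]
  rw [Bool.eq_iff_iff]
  simp only [List.append_assoc, List.mem_append, List.mem_cons,
    List.not_mem_nil, Prod.mk.injEq, decide_eq_true_eq, Bool.or_eq_true, Bool.and_eq_true,
    beq_iff_eq, or_false]
  by_cases h : 1 ≤ left ∧ left ≤ 12 ∧ 1 ≤ right ∧ right ≤ 12
  · obtain ⟨h1, h2, h3, h4⟩ := h
    interval_cases left <;> interval_cases right <;> decide
  · constructor <;> (intro hx; exfalso; omega)
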